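-- pv_equiv track=rewrite | github.com/gabriel-jcx/robust-kbench | robust_kbench/kernel_task.py | extract_forward_fn
-- ===== SOURCE A (Python) =====
-- def extract_forward_fn(code_str: str) -> str:
--     """Extract the forward_fn definition from the code"""
--     # Find the start of forward_fn
--     start = code_str.find("def forward_fn")
--     if start == -1:
--         return None
--
--     # Find the next function definition or class definition
--     next_def = code_str.find("\ndef ", start + 1)
--     next_class = code_str.find("\nclass ", start + 1)
--
--     # Get the earlier of the two (if they exist)
--     end_candidates = [pos for pos in [next_def, next_class] if pos != -1]
--     end = min(end_candidates) if end_candidates else len(code_str)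
--
--     # Extract the function definition
--     fn_str = code_str[start:end].strip()
--     return fn_str
-- ===== SOURCE B (Python) =====
-- def extract_forward_fn(code_str: str) -> str:
--     """Extract the forward_fn definition from the code"""
--     start = code_str.find("def forward_fn")
--     if start == -1:
--         return None
--     lines = code_str[start:].split("\n")
--     kept = [lines[0]]
--     for line in lines[1:]:
--         if line.startswith("def ") or line.startswith("class "):
--             break
--         kept.append(line)
--     return "\n".join(kept).strip()
-- ===== Notes on version B (the rewrite author's own statement) =====
-- stated objective: alternative
-- what changed: Replaces the two newline-anchored substring searches plus min-of-offsets arithmetic with a single line-wise scan: split the tail at newlines and collect lines until the first function- or class-definition boundary line.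
import Mathlib
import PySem

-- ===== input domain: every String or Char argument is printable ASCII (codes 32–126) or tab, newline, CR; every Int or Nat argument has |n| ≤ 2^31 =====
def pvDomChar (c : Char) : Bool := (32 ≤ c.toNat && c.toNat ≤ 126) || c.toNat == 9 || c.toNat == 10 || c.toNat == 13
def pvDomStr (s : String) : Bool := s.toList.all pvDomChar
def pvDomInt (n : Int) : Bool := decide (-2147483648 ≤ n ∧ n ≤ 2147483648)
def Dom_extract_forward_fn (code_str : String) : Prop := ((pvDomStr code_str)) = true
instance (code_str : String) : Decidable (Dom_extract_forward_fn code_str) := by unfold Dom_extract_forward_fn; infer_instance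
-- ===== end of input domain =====

-- B replaces A's two substring searches + min-of-offsets with a line-wise scan that collects
-- lines until the first "def "/"class " boundary line (objective: alternative decomposition).

-- ===== PORT A =====
def extract_forward_fn (code_str : String) : Option String :=
  let start := PySem.Str.find code_str "def forward_fn"
  if start = -1 then none
  else
    let next_def := PySem.Str.findFrom code_str "\ndef " (start + 1)
    let next_class := PySem.Str.findFrom code_str "\nclass " (start + 1)
    let end_candidates := [next_def, next_class].filter (fun pos => pos ≠ -1)
    let e : Int :=
      match PySem.List.min? end_candidates (fun x => x) with
      | some m => m
      | none => PySem.Str.len code_str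
    some (PySem.Str.strip (PySem.Str.slice code_str (some start) (some e)))

-- ===== PORT B =====
def extract_forward_fn_alt (code_str : String) : Option String :=
  let start := PySem.Str.find code_str "def forward_fn"
  if start = -1 then none
  else
    match PySem.Str.split? (PySem.Str.slice code_str (some start) none) "\n" with
    | some (l0 :: rest) =>
        let kept := l0 :: rest.takeWhile (fun line =>
          !(PySem.Str.startswith line "def " || PySem.Str.startswith line "class "))
        some (PySem.Str.strip (PySem.Str.join "\n" kept))
    | _ => none  -- unreachable: the separator "\n" is nonempty, so split? always returns a nonempty list

-- ===== PRECONDITION & SPEC =====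
def Spec_extract_forward_fn (code_str : String) (out : Option String) : Prop := out = extract_forward_fn_alt code_str
instance (code_str : String) (out : Option String) : Decidable (Spec_extract_forward_fn code_str out) := by unfold Spec_extract_forward_fn; infer_instance

-- ===== CLAIM (what is proved, stated in full; the proofs are below) =====
def Claim_equal_extract_forward_fn : Prop := ∀ (code_str : String), Dom_extract_forward_fn code_str → Spec_extract_forward_fn code_str (extract_forward_fn code_str)

-- ===== LEMMAS AND PROOFS =====

def pvSplit (sc : Char) : List Char → List (List Char)
  | [] => [[]]
  | c :: rest =>
    if c = sc then [] :: pvSplit sc rest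
    else
      match pvSplit sc rest with
      | [] => [[c]]
      | l :: ls => (c :: l) :: ls

theorem pvSplit_ne_nil (sc : Char) (t : List Char) : pvSplit sc t ≠ [] := by
  cases t with
  | nil => simp [pvSplit]
  | cons c rest =>
    simp only [pvSplit]
    split
    · simp
    · split <;> simp

def pvMapHead (f : List Char → List Char) : List (List Char) → List (List Char)
  | [] => []
  | x :: xs => f x :: xs

theorem go_pvSplit (sc : Char) (fuel : Nat) :
    ∀ (l cur : List Char) (acc : List (List Char)), l.length ≤ fuel →
      PySem.Chars.splitOn.go [sc] fuel l cur acc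
        = acc.reverse ++ pvMapHead (cur.reverse ++ ·) (pvSplit sc l) := by
  induction fuel with
  | zero =>
    intro l cur acc h
    have : l = [] := by cases l <;> simp_all
    subst this
    simp [PySem.Chars.splitOn.go, pvSplit, pvMapHead]
  | succ fuel ih =>
    intro l cur acc h
    cases l with
    | nil => simp [PySem.Chars.splitOn.go, pvSplit, pvMapHead]
    | cons c rest =>
      by_cases hc : c = sc
      · subst hc
        have hpre : [c].isPrefixOf (c :: rest) = true := by simp [List.isPrefixOf]
        rw [show PySem.Chars.splitOn.go [c] (fuel+1) (c :: rest) cur acc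
            = PySem.Chars.splitOn.go [c] fuel (List.drop 1 (c :: rest)) [] (cur.reverse :: acc) by
          simp [PySem.Chars.splitOn.go, hpre]]
        simp only [List.drop_one, List.tail_cons]
        rw [ih rest [] (cur.reverse :: acc) (by simpa using Nat.le_of_succ_le_succ (by simpa using h))]
        simp [pvSplit, pvMapHead]
        cases hs : pvSplit c rest with
        | nil => exact absurd hs (pvSplit_ne_nil c rest)
        | cons x xs => simp [pvMapHead]
      · have hpre : [sc].isPrefixOf (c :: rest) = false := by
          simp [List.isPrefixOf]; exact fun hh => absurd hh.symm hc
        rw [show PySem.Chars.splitOn.go [sc] (fuel+1) (c :: rest) cur acc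
            = PySem.Chars.splitOn.go [sc] fuel rest (c :: cur) acc by
          simp [PySem.Chars.splitOn.go, hpre]]
        rw [ih rest (c :: cur) acc (by simpa using Nat.le_of_succ_le_succ (by simpa using h))]
        simp only [pvSplit, if_neg hc]
        cases hs : pvSplit sc rest with
        | nil => exact absurd hs (pvSplit_ne_nil sc rest)
        | cons x xs => simp [pvMapHead]

theorem splitOn_eq_pvSplit (s : List Char) (sc : Char) :
    PySem.Chars.splitOn s [sc] = pvSplit sc s := by
  have := go_pvSplit sc (s.length + 1) s [] [] (by omega)
  simp only [PySem.Chars.splitOn] at *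
  rw [this]
  cases hs : pvSplit sc s with
  | nil => exact absurd hs (pvSplit_ne_nil sc s)
  | cons x xs => simp [pvMapHead]

def pvBmark (t : List Char) : Bool :=
  "\ndef ".toList.isPrefixOf t || "\nclass ".toList.isPrefixOf t

def pvCut : List Char → Nat
  | [] => 0
  | c :: rest => if pvBmark (c :: rest) then 0 else pvCut rest + 1

theorem pvCut_min (t : List Char) : ∀ i < pvCut t, pvBmark (t.drop i) = false := by
  induction t with
  | nil => simp [pvCut]
  | cons c rest ih =>
    intro i hi
    simp only [pvCut] at hi
    split at hi
    · omega
    · cases i with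
      | zero => simpa using by rename_i hb; simpa using hb
      | succ j => simpa using ih j (by omega)

theorem pvCut_hit (t : List Char) : pvCut t = t.length ∨ pvBmark (t.drop (pvCut t)) = true := by
  induction t with
  | nil => simp [pvCut]
  | cons c rest ih =>
    simp only [pvCut]
    split
    · right; simpa
    · rcases ih with h | h
      · left; simp [h]
      · right; simpa using h

-- head of pvSplit is the first line
theorem pvSplit_head (sc : Char) (t : List Char) :
    (pvSplit sc t).head? = some (t.takeWhile (· ≠ sc)) := by
  induction t with
  | nil => simp [pvSplit]
  | cons c rest ih =>
    by_cases hc : c = sc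
    · subst hc; simp [pvSplit, List.takeWhile]
    · simp only [pvSplit, if_neg hc]
      cases hs : pvSplit sc rest with
      | nil => exact absurd hs (pvSplit_ne_nil sc rest)
      | cons x xs =>
        rw [hs] at ih
        simp at ih
        simp [List.takeWhile, hc, ih]

-- a newline-free pattern is a prefix of t iff it is a prefix of t's first line
theorem prefix_takeWhile_of (p : List Char) : ∀ (t : List Char), '\n' ∉ p → p <+: t →
    p <+: t.takeWhile (· ≠ '\n') := by
  induction p with
  | nil => intro t _ _; simp
  | cons a p' ih =>
    intro t hp h
    cases t with
    | nil => simp at h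
    | cons c rest =>
      rcases (List.cons_prefix_cons.mp h) with ⟨rfl, h2⟩
      have ha : a ≠ '\n' := fun hh => hp (hh ▸ List.mem_cons_self)
      rw [List.takeWhile_cons_of_pos (by simpa using ha)]
      exact List.cons_prefix_cons.mpr ⟨rfl, ih rest (fun hh => hp (List.mem_cons_of_mem _ hh)) h2⟩

theorem prefix_takeWhile_iff (p t : List Char) (hp : '\n' ∉ p) :
    p <+: t ↔ p <+: t.takeWhile (· ≠ '\n') := by
  constructor
  · exact prefix_takeWhile_of p t hp
  · intro h
    exact h.trans (List.takeWhile_prefix _)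

def pvKeep (l : List Char) : Bool :=
  !("def ".toList.isPrefixOf l || "class ".toList.isPrefixOf l)

theorem intercalate_cons_char (c : Char) (l : List Char) (xs : List (List Char)) :
    ['\n'].intercalate ((c :: l) :: xs) = c :: ['\n'].intercalate (l :: xs) := by
  cases xs <;> simp [List.intercalate]

theorem intercalate_nil_cons (x : List Char) (xs : List (List Char)) :
    ['\n'].intercalate ([] :: x :: xs) = '\n' :: ['\n'].intercalate (x :: xs) := by
  simp [List.intercalate]

theorem pvB_join (t : List Char) :
    ∀ (h : List Char) (tl : List (List Char)), pvSplit '\n' t = h :: tl →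
      ['\n'].intercalate (h :: tl.takeWhile pvKeep) = t.take (pvCut t) := by
  induction t with
  | nil =>
    intro h tl hs
    simp [pvSplit] at hs
    simp [hs.1, hs.2, pvCut, List.intercalate]
  | cons c rest ih =>
    intro h tl hs
    by_cases hc : c = '\n'
    · subst hc
      simp only [pvSplit, if_pos rfl] at hs
      cases hs2 : pvSplit '\n' rest with
      | nil => exact absurd hs2 (pvSplit_ne_nil _ _)
      | cons l ls =>
        rw [hs2] at hs
        injection hs with h1 h2
        subst h1; subst h2
        have hl : l = rest.takeWhile (· ≠ '\n') := by
          have := pvSplit_head '\n' rest; rw [hs2] at this; simpa using this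
        have hmark : pvBmark ('\n' :: rest)
            = ("def ".toList.isPrefixOf rest || "class ".toList.isPrefixOf rest) := by
          simp [pvBmark, List.isPrefixOf]
        have hpfx : ∀ p : List Char, '\n' ∉ p →
            (p.isPrefixOf l = p.isPrefixOf rest) := by
          intro p hp
          have hiff : p <+: l ↔ p <+: rest := by
            rw [hl]
            exact (prefix_takeWhile_iff p rest hp).symm
          rcases hh : p.isPrefixOf rest with _ | _
          · by_contra hcon
            simp only [Bool.not_eq_false] at hcon
            rw [List.isPrefixOf_iff_prefix.mpr
              (hiff.mp (List.isPrefixOf_iff_prefix.mp hcon))] at hh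
            simp at hh
          · exact List.isPrefixOf_iff_prefix.mpr
              (hiff.mpr (List.isPrefixOf_iff_prefix.mp hh))
        have hkeep : pvKeep l = !pvBmark ('\n' :: rest) := by
          rw [hmark, pvKeep, hpfx _ (by decide), hpfx _ (by decide)]
        by_cases hb : pvBmark ('\n' :: rest) = true
        · rw [List.takeWhile_cons_of_neg (by simp [hkeep, hb])]
          simp [List.intercalate, pvCut, hb]
        · rw [List.takeWhile_cons_of_pos (by simp [hkeep]; simpa using hb)]
          rw [intercalate_nil_cons, ih l ls hs2]
          simp [pvCut, hb]
    · simp only [pvSplit, if_neg hc] at hs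
      cases hs2 : pvSplit '\n' rest with
      | nil => exact absurd hs2 (pvSplit_ne_nil _ _)
      | cons l ls =>
        rw [hs2] at hs
        injection hs with h1 h2
        subst h1; subst h2
        rw [intercalate_cons_char, ih l ls hs2]
        have hb : pvBmark (c :: rest) = false := by
          simp [pvBmark, List.isPrefixOf, hc]
          exact ⟨fun h => absurd h.symm hc, fun h => absurd h.symm hc⟩
        simp [pvCut, hb]

theorem pvBmark_drop_lt (u : List Char) (m : Nat) (h : pvBmark (u.drop m) = true) :
    m < u.length := by
  by_contra hm
  rw [List.drop_eq_nil_of_le (by omega)] at h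
  simp [pvBmark, List.isPrefixOf] at h

theorem pvCut_unique (u : List Char) (m : Nat)
    (h1 : pvBmark (u.drop m) = true)
    (h2 : ∀ i < m, pvBmark (u.drop i) = false) :
    pvCut u = m := by
  rcases Nat.lt_trichotomy (pvCut u) m with hlt | heq | hgt
  · rcases pvCut_hit u with hh | hh
    · have := pvBmark_drop_lt u m h1
      omega
    · rw [h2 _ hlt] at hh; simp at hh
  · exact heq
  · rw [pvCut_min u m hgt] at h1; simp at h1

-- no boundary at all: pvCut is the length
theorem pvCut_eq_length (u : List Char)
    (h : ∀ i, pvBmark (u.drop i) = false) : pvCut u = u.length := by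
  rcases pvCut_hit u with hh | hh
  · exact hh
  · rw [h _] at hh; simp at hh

-- absence of an infix means no prefix at any drop position
theorem no_prefix_of_not_infix (sub u : List Char) (h : ¬ sub <:+: u) :
    ∀ i, ¬ sub <+: u.drop i := by
  intro i hp
  exact h ((PySem.Chars.isIn_iff_infix sub u).mp
    ((PySem.Chars.exists_prefix_drop_iff_isIn sub u).mp ⟨i, hp⟩))

theorem pvBmark_false_iff (v : List Char) :
    pvBmark v = false ↔ ¬ "\ndef ".toList <+: v ∧ ¬ "\nclass ".toList <+: v := by
  simp only [pvBmark, ← Bool.not_eq_true, Bool.or_eq_true, List.isPrefixOf_iff_prefix]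
  tauto

theorem pvBmark_true_of_left (v : List Char) (h : "\ndef ".toList <+: v) : pvBmark v = true := by
  simp [pvBmark, List.isPrefixOf_iff_prefix]; exact Or.inl h

theorem pvBmark_true_of_right (v : List Char) (h : "\nclass ".toList <+: v) : pvBmark v = true := by
  simp [pvBmark, List.isPrefixOf_iff_prefix]; exact Or.inr h

theorem pvCut_none_none (u : List Char)
    (hd : PySem.Chars.find u "\ndef ".toList = -1)
    (hc : PySem.Chars.find u "\nclass ".toList = -1) : pvCut u = u.length := by
  apply pvCut_eq_length
  intro i
  rw [pvBmark_false_iff]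
  exact ⟨no_prefix_of_not_infix _ u ((PySem.Chars.find_eq_neg_one_iff _ _).mp hd) i,
         no_prefix_of_not_infix _ u ((PySem.Chars.find_eq_neg_one_iff _ _).mp hc) i⟩

theorem pvCut_some_none (u : List Char)
    (hd : 0 ≤ PySem.Chars.find u "\ndef ".toList)
    (hc : PySem.Chars.find u "\nclass ".toList = -1) :
    pvCut u = (PySem.Chars.find u "\ndef ".toList).toNat := by
  obtain ⟨h1, h2⟩ := PySem.Chars.find_spec hd
  apply pvCut_unique _ _ (pvBmark_true_of_left _ h1)
  intro i hi
  rw [pvBmark_false_iff]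
  exact ⟨h2 i hi, no_prefix_of_not_infix _ u ((PySem.Chars.find_eq_neg_one_iff _ _).mp hc) i⟩

theorem pvCut_none_some (u : List Char)
    (hd : PySem.Chars.find u "\ndef ".toList = -1)
    (hc : 0 ≤ PySem.Chars.find u "\nclass ".toList) :
    pvCut u = (PySem.Chars.find u "\nclass ".toList).toNat := by
  obtain ⟨h1, h2⟩ := PySem.Chars.find_spec hc
  apply pvCut_unique _ _ (pvBmark_true_of_right _ h1)
  intro i hi
  rw [pvBmark_false_iff]
  exact ⟨no_prefix_of_not_infix _ u ((PySem.Chars.find_eq_neg_one_iff _ _).mp hd) i, h2 i hi⟩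

theorem pvCut_some_some (u : List Char)
    (hd : 0 ≤ PySem.Chars.find u "\ndef ".toList)
    (hc : 0 ≤ PySem.Chars.find u "\nclass ".toList) :
    pvCut u = (min (PySem.Chars.find u "\ndef ".toList)
                   (PySem.Chars.find u "\nclass ".toList)).toNat := by
  obtain ⟨hd1, hd2⟩ := PySem.Chars.find_spec hd
  obtain ⟨hc1, hc2⟩ := PySem.Chars.find_spec hc
  apply pvCut_unique
  · rcases min_cases (PySem.Chars.find u "\ndef ".toList)
      (PySem.Chars.find u "\nclass ".toList) with ⟨he, _⟩ | ⟨he, _⟩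
    · rw [he]; exact pvBmark_true_of_left _ hd1
    · rw [he]; exact pvBmark_true_of_right _ hc1
  · intro i hi
    rw [pvBmark_false_iff]
    have hi' : (i : Int) < min (PySem.Chars.find u "\ndef ".toList)
        (PySem.Chars.find u "\nclass ".toList) := by
      have := Int.toNat_of_nonneg (le_min hd hc)
      omega
    exact ⟨hd2 i (by omega), hc2 i (by omega)⟩

-- abbreviation lemma: the B side computed at the char level
theorem B_side (cs : String) (k : Nat)
    (hk : 0 ≤ (k : Int)) :
    (match PySem.Str.split? (PySem.Str.slice cs (some (k : Int)) none) "\n" with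
    | some (l0 :: rest) =>
        some (PySem.Str.strip (PySem.Str.join "\n" (l0 :: rest.takeWhile (fun line =>
          !(PySem.Str.startswith line "def " || PySem.Str.startswith line "class ")))))
    | _ => none)
    = some (String.ofList (PySem.Chars.strip
        ((cs.toList.drop k).take (pvCut (cs.toList.drop k))))) := by
  have hslice : PySem.Str.slice cs (some (k : Int)) none
      = String.ofList (cs.toList.drop k) := by
    simp only [PySem.Str.slice, PySem.Chars.slice_eq_listSlice]
    rw [PySem.List.slice_from _ (by positivity)]
    simp
  rw [hslice]
  have hsplit : PySem.Str.split? (String.ofList (cs.toList.drop k)) "\n"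
      = some (List.map String.ofList (pvSplit '\n' (cs.toList.drop k))) := by
    simp only [PySem.Str.split?, String.toList_ofList]
    have : ("\n".toList : List Char) = ['\n'] := rfl
    rw [this]
    simp only [PySem.Chars.split?]
    rw [if_neg (by simp)]
    rw [splitOn_eq_pvSplit]
    rfl
  rw [hsplit]
  cases hps : pvSplit '\n' (cs.toList.drop k) with
  | nil => exact absurd hps (pvSplit_ne_nil _ _)
  | cons h' tl =>
    simp only [List.map_cons]
    have htw : List.takeWhile (fun line =>
        !(PySem.Str.startswith line "def " || PySem.Str.startswith line "class "))
        (List.map String.ofList tl) = List.map String.ofList (tl.takeWhile pvKeep) := by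
      rw [List.takeWhile_map]
      have hpred : ((fun line =>
          !(PySem.Str.startswith line "def " || PySem.Str.startswith line "class "))
            ∘ String.ofList) = pvKeep := by
        funext l
        simp [PySem.Str.startswith, PySem.Chars.startswith, pvKeep, Function.comp]
      rw [hpred]
    rw [htw]
    have hjoin : PySem.Str.join "\n" (String.ofList h' :: List.map String.ofList (tl.takeWhile pvKeep))
        = String.ofList (['\n'].intercalate (h' :: tl.takeWhile pvKeep)) := by
      simp only [PySem.Str.join, List.map_cons, List.map_map, String.toList_ofList]
      have h9 : ("\n".toList : List Char) = ['\n'] := rfl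
      rw [h9]
      congr 1
      simp only [PySem.Chars.join]
      congr 1
      simp [Function.comp_def]
    rw [hjoin]
    rw [pvB_join _ _ _ hps]
    simp [PySem.Str.strip]

theorem extract_forward_fn_spec : Claim_equal_extract_forward_fn := by
  unfold Claim_equal_extract_forward_fn
  intro cs hdom
  unfold Spec_extract_forward_fn extract_forward_fn extract_forward_fn_alt
  by_cases h0 : PySem.Str.find cs "def forward_fn" = -1
  · rw [if_pos h0, if_pos h0]
  · rw [if_neg h0, if_neg h0]
    rw [PySem.Str.find_eq] at h0 ⊢
    have hf0 : 0 ≤ PySem.Chars.find cs.toList "def forward_fn".toList := by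
      have := PySem.Chars.neg_one_le_find cs.toList "def forward_fn".toList
      omega
    obtain ⟨h1, _⟩ := PySem.Chars.find_spec hf0
    obtain ⟨v, hv⟩ := h1
    rw [(Int.toNat_of_nonneg hf0).symm]
    set k := (PySem.Chars.find cs.toList "def forward_fn".toList).toNat with hkdef
    rw [B_side cs k (by positivity)]
    -- facts about the tail
    have hlen : cs.toList.length - k = 14 + v.length := by
      have h2 := congrArg List.length hv
      rw [List.length_append, List.length_drop] at h2
      have h3 : ("def forward_fn".toList).length = 14 := rfl
      omega
    have hkle : k ≤ cs.toList.length := by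
      have := PySem.Chars.find_le_length cs.toList "def forward_fn".toList
      omega
    have hk1 : k + 1 ≤ cs.toList.length := by omega
    have ht : cs.toList.drop k
        = 'd' :: (['e','f',' ','f','o','r','w','a','r','d','_','f','n'] ++ v) := by
      rw [← hv]; rfl
    have hu : cs.toList.drop (k+1)
        = ['e','f',' ','f','o','r','w','a','r','d','_','f','n'] ++ v := by
      have : cs.toList.drop (k+1) = (cs.toList.drop k).drop 1 := by
        rw [List.drop_drop]
      rw [this, ht]
      rfl
    have hcut : pvCut (cs.toList.drop k) = pvCut (cs.toList.drop (k+1)) + 1 := by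
      rw [ht, hu]
      simp only [List.cons_append, List.nil_append]
      conv_lhs => rw [pvCut]
      rw [if_neg (by simp [pvBmark, List.isPrefixOf])]
    have hulen : (cs.toList.drop (k+1)).length = 13 + v.length := by
      simp [hu]
      omega
    -- rewrite the two findFrom calls
    rw [PySem.Str.findFrom_eq, PySem.Str.findFrom_eq]
    have hcast : ((k : Int) + 1) = ((k + 1 : Nat) : Int) := by push_cast; ring
    rw [hcast, PySem.Chars.findFrom_natCast _ _ (k+1) hk1,
        PySem.Chars.findFrom_natCast _ _ (k+1) hk1]
    set fd := PySem.Chars.find (cs.toList.drop (k+1)) "\ndef ".toList with hfddef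
    set fc := PySem.Chars.find (cs.toList.drop (k+1)) "\nclass ".toList with hfcdef
    have hfdlb : -1 ≤ fd := PySem.Chars.neg_one_le_find _ _
    have hfclb : -1 ≤ fc := PySem.Chars.neg_one_le_find _ _
    by_cases hd1 : fd = -1 <;> by_cases hc1 : fc = -1
    · -- no boundary: slice to the end
      rw [if_pos hd1, if_pos hc1]
      dsimp only
      have : ([(-1 : Int), -1].filter (fun pos => pos ≠ -1)) = [] := by decide
      rw [this]
      simp only [PySem.List.min?, List.foldl]
      have hslice : PySem.Str.slice cs (some (k : Int)) (some (PySem.Str.len cs))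
          = String.ofList ((cs.toList.drop k).take (pvCut (cs.toList.drop k))) := by
        simp only [PySem.Str.slice, PySem.Chars.slice_eq_listSlice, PySem.Str.len]
        rw [PySem.List.slice_natCast]
        congr 1
        congr 1
        rw [hcut, pvCut_none_none _ hd1 hc1, hulen]
        omega
      rw [hslice]
      simp [PySem.Str.strip]
    · -- only "\nclass " found
      rw [if_pos hd1, if_neg hc1]
      dsimp only
      have hfc0 : 0 ≤ fc := by omega
      have hne : ((k : Int) + 1 + fc) ≠ -1 := by omega
      have : ([(-1 : Int), ((k + 1 : Nat) : Int) + fc].filter (fun pos => pos ≠ -1))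
          = [((k + 1 : Nat) : Int) + fc] := by
        simp [List.filter, hne]
      rw [this]
      simp only [PySem.List.min?, List.foldl]
      have he : ((k + 1 : Nat) : Int) + fc = ((k + 1 + fc.toNat : Nat) : Int) := by
        push_cast
        omega
      rw [he]
      have hslice : PySem.Str.slice cs (some (k : Int)) (some ((k + 1 + fc.toNat : Nat) : Int))
          = String.ofList ((cs.toList.drop k).take (pvCut (cs.toList.drop k))) := by
        simp only [PySem.Str.slice, PySem.Chars.slice_eq_listSlice]
        rw [PySem.List.slice_natCast]
        congr 1
        congr 1
        rw [hcut, pvCut_none_some _ hd1 hfc0]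
        omega
      rw [hslice]
      simp [PySem.Str.strip]
    · -- only "\ndef " found
      rw [if_neg hd1, if_pos hc1]
      dsimp only
      have hfd0 : 0 ≤ fd := by omega
      have hne : ((k : Int) + 1 + fd) ≠ -1 := by omega
      have : ([((k + 1 : Nat) : Int) + fd, (-1 : Int)].filter (fun pos => pos ≠ -1))
          = [((k + 1 : Nat) : Int) + fd] := by
        simp [List.filter, hne]
      rw [this]
      simp only [PySem.List.min?, List.foldl]
      have he : ((k + 1 : Nat) : Int) + fd = ((k + 1 + fd.toNat : Nat) : Int) := by
        push_cast
        omega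
      rw [he]
      have hslice : PySem.Str.slice cs (some (k : Int)) (some ((k + 1 + fd.toNat : Nat) : Int))
          = String.ofList ((cs.toList.drop k).take (pvCut (cs.toList.drop k))) := by
        simp only [PySem.Str.slice, PySem.Chars.slice_eq_listSlice]
        rw [PySem.List.slice_natCast]
        congr 1
        congr 1
        rw [hcut, pvCut_some_none _ hfd0 hc1]
        omega
      rw [hslice]
      simp [PySem.Str.strip]
    · -- both found: the earlier one wins
      rw [if_neg hd1, if_neg hc1]
      dsimp only
      have hfd0 : 0 ≤ fd := by omega
      have hfc0 : 0 ≤ fc := by omega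
      have hned : ((k : Int) + 1 + fd) ≠ -1 := by omega
      have hnec : ((k : Int) + 1 + fc) ≠ -1 := by omega
      have : ([((k + 1 : Nat) : Int) + fd, ((k + 1 : Nat) : Int) + fc].filter (fun pos => pos ≠ -1))
          = [((k + 1 : Nat) : Int) + fd, ((k + 1 : Nat) : Int) + fc] := by
        simp [List.filter, hned, hnec]
      rw [this]
      simp only [PySem.List.min?, List.foldl]
      have he : (if ((k + 1 : Nat) : Int) + fc < ((k + 1 : Nat) : Int) + fd
            then some (((k + 1 : Nat) : Int) + fc) else some (((k + 1 : Nat) : Int) + fd))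
          = some ((k + 1 + (min fd fc).toNat : Nat) : Int) := by
        split_ifs with h <;> · congr 1; push_cast; omega
      rw [he]
      have hslice : PySem.Str.slice cs (some (k : Int)) (some ((k + 1 + (min fd fc).toNat : Nat) : Int))
          = String.ofList ((cs.toList.drop k).take (pvCut (cs.toList.drop k))) := by
        simp only [PySem.Str.slice, PySem.Chars.slice_eq_listSlice]
        rw [PySem.List.slice_natCast]
        congr 1
        congr 1
        rw [hcut, pvCut_some_some _ hfd0 hfc0]
        omega
      rw [hslice]
      simp [PySem.Str.strip]
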